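-- pv_equiv track=rewrite | github.com/lias-laboratory/gcdplus | scheduling/can.py | middleOfLargestInterval
-- ===== SOURCE A (Python) =====
-- def middleOfLargestInterval(listCalls, maxTime):
--     if len(listCalls) == 0: return (maxTime -1)//2
--     if listCalls[0] == 0: position = 0
--     else: position = (listCalls[0] - 1) // 2
--     maxInterval = listCalls[0]
--
--     for i in range(len(listCalls)-1):
--         delta = listCalls[i+1] - listCalls[i]
--         if delta > maxInterval:
--             maxInterval = delta
--             position = listCalls[i] + delta//2    # Add 0 if delta = 1 or 2; add 1 if biggestInterval_length = 3 or 4; ...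
--     delta = maxTime - 1 - listCalls[-1]
--
--     if delta > maxInterval: return listCalls[-1] + (delta - 1)//2
--     else: return position
-- ===== SOURCE B (Python) =====
-- def middleOfLargestInterval(listCalls, maxTime):
--     if len(listCalls) == 0:
--         return (maxTime - 1) // 2
--     gaps = [listCalls[0]]
--     gaps += [b - a for a, b in zip(listCalls, listCalls[1:])]
--     gaps.append(maxTime - 1 - listCalls[-1])
--     big = max(gaps)
--     i = gaps.index(big)
--     if i == 0:
--         return 0 if listCalls[0] == 0 else (listCalls[0] - 1) // 2
--     if i == len(listCalls):
--         return listCalls[-1] + (big - 1) // 2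
--     return listCalls[i - 1] + big // 2
-- ===== Notes on version B (the rewrite author's own statement) =====
-- stated objective: alternative
-- what changed: B replaces A's single running-max scan carrying a midpoint with staged passes: build the list of gap sizes only, take max(), locate its first index with list.index, and compute the one midpoint formula selected by that index.
import Mathlib
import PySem

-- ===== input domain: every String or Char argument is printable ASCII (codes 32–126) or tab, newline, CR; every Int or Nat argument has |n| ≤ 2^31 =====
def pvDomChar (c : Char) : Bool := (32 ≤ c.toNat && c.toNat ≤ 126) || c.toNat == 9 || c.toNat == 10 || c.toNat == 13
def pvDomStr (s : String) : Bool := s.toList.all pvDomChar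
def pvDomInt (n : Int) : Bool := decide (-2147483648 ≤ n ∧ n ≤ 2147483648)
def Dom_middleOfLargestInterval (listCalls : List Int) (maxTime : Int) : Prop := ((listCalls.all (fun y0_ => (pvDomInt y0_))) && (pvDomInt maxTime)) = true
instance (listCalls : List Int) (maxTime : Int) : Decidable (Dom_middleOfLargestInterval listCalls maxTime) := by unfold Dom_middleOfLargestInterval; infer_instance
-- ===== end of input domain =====

-- B replaces A's running-max scan (which carries a midpoint along) with staged passes:
-- build the gap-size list, take max, find its first index, then compute the one
-- selected midpoint formula (objective: alternative decomposition).

-- ===== PORT A =====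
-- the for-loop of A over i in range(len-1): state (prev = listCalls[i], maxInterval, position)
def pvALoop (t : List Int) (prev maxI pos : Int) : Int × Int × Int :=
  match t with
  | [] => (prev, maxI, pos)
  | x :: rest =>
    let delta := x - prev
    if maxI < delta then pvALoop rest x delta (prev + PySem.Int.floordiv delta 2)
    else pvALoop rest x maxI pos

def middleOfLargestInterval (listCalls : List Int) (maxTime : Int) : Int :=
  match listCalls with
  | [] => PySem.Int.floordiv (maxTime - 1) 2
  | h :: t =>
    let pos0 : Int := if h = 0 then 0 else PySem.Int.floordiv (h - 1) 2
    let r := pvALoop t h h pos0          -- r = (listCalls[-1], maxInterval, position)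
    let delta := maxTime - 1 - r.1
    if r.2.1 < delta then r.1 + PySem.Int.floordiv (delta - 1) 2 else r.2.2

-- ===== PORT B =====
def middleOfLargestInterval_alt (listCalls : List Int) (maxTime : Int) : Int :=
  match listCalls with
  | [] => PySem.Int.floordiv (maxTime - 1) 2
  | h :: t =>
    let lst := PySem.List.pyGetD (h :: t) (-1) 0      -- listCalls[-1], in range
    let gaps := h :: ((h :: t).zip t).map (fun p => p.2 - p.1) ++ [maxTime - 1 - lst]
    match PySem.List.max? gaps (fun x => x) with      -- max(gaps): gaps nonempty, never raises
    | some big =>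
      match PySem.List.index? gaps big with           -- gaps.index(big): big ∈ gaps, never raises
      | some i =>
        if i = 0 then (if h = 0 then (0 : Int) else PySem.Int.floordiv (h - 1) 2)
        else if i = (h :: t).length then lst + PySem.Int.floordiv (big - 1) 2
        else (h :: t).getD (i - 1) 0 + PySem.Int.floordiv big 2   -- listCalls[i-1], index in range
      | none => 0    -- unreachable
    | none => 0      -- unreachable

-- ===== PRECONDITION & SPEC =====
def Spec_middleOfLargestInterval (listCalls : List Int) (maxTime : Int) (out : Int) : Prop := out = middleOfLargestInterval_alt listCalls maxTime
instance (listCalls : List Int) (maxTime : Int) (out : Int) : Decidable (Spec_middleOfLargestInterval listCalls maxTime out) := by unfold Spec_middleOfLargestInterval; infer_instance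

-- ===== CLAIM (what is proved, stated in full; the proofs are below) =====
def Claim_equal_middleOfLargestInterval : Prop := ∀ (listCalls : List Int) (maxTime : Int), Dom_middleOfLargestInterval listCalls maxTime → Spec_middleOfLargestInterval listCalls maxTime (middleOfLargestInterval listCalls maxTime)

-- ===== LEMMAS AND PROOFS =====

-- the deltas of consecutive elements of prev :: t
def pvDs (prev : Int) (t : List Int) : List Int :=
  ((prev :: t).zip t).map (fun p => p.2 - p.1)

lemma pvDs_cons (prev x : Int) (rest : List Int) :
    pvDs prev (x :: rest) = (x - prev) :: pvDs x rest := by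
  simp [pvDs]

-- index? returns the first index for a member
lemma index?_of_mem (l : List Int) (v : Int) (hm : v ∈ l) :
    PySem.List.index? l v = some (l.idxOf v) := by
  induction l with
  | nil => cases hm
  | cons x r ih =>
    by_cases hx : x = v
    · subst hx; rw [PySem.List.index?_cons_self, List.idxOf_cons_self]
    · have hv : v ∈ r := by
        rcases List.mem_cons.mp hm with he | h
        · exact absurd he.symm hx
        · exact h
      rw [PySem.List.index?_cons_of_ne _ hx, ih hv, List.idxOf_cons_ne _ hx]
      rfl

lemma pyGetD_neg_one_cons (prev x : Int) (rest : List Int) :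
    PySem.List.pyGetD (prev :: x :: rest) (-1) 0 = PySem.List.pyGetD (x :: rest) (-1) 0 := by
  simp [PySem.List.pyGetD_neg_one, List.getLast_cons]

-- characterisation of A's loop: last element, running max of the deltas, and the
-- position = midpoint of the FIRST delta attaining the max (or the initial pos)
lemma pvALoop_char (t : List Int) (prev maxI pos : Int) :
    (pvALoop t prev maxI pos).1 = PySem.List.pyGetD (prev :: t) (-1) 0
    ∧ (pvALoop t prev maxI pos).2.1 = (pvDs prev t).foldl max maxI
    ∧ (pvALoop t prev maxI pos).2.2
        = (if (pvDs prev t).foldl max maxI = maxI then pos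
           else (prev :: t).getD ((pvDs prev t).idxOf ((pvDs prev t).foldl max maxI)) 0
             + PySem.Int.floordiv ((pvDs prev t).foldl max maxI) 2) := by
  induction t generalizing prev maxI pos with
  | nil => simp [pvALoop, pvDs, PySem.List.pyGetD_neg_one]
  | cons x rest ih =>
    simp only [pvALoop, pvDs_cons, List.foldl_cons]
    by_cases hlt : maxI < x - prev
    · rw [if_pos hlt, max_eq_right (le_of_lt hlt)]
      obtain ⟨i1, i2, i3⟩ := ih x (x - prev) (prev + PySem.Int.floordiv (x - prev) 2)
      refine ⟨by rw [i1, pyGetD_neg_one_cons], by rw [i2], ?_⟩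
      rw [i3]
      have hMge := (PySem.List.le_foldl_max (pvDs x rest) (x - prev)).1
      rw [if_neg (show ¬ (pvDs x rest).foldl max (x - prev) = maxI by omega)]
      by_cases heq : (pvDs x rest).foldl max (x - prev) = x - prev
      · rw [if_pos heq, heq, List.idxOf_cons_self]
        rfl
      · rw [if_neg heq, List.idxOf_cons_ne _ (fun hne => heq hne.symm)]
        rfl
    · rw [if_neg hlt, max_eq_left (by omega)]
      obtain ⟨i1, i2, i3⟩ := ih x maxI pos
      refine ⟨by rw [i1, pyGetD_neg_one_cons], by rw [i2], ?_⟩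
      rw [i3]
      have hMge := (PySem.List.le_foldl_max (pvDs x rest) maxI).1
      by_cases hMe : (pvDs x rest).foldl max maxI = maxI
      · rw [if_pos hMe, if_pos hMe]
      · rw [if_neg hMe, if_neg hMe,
          List.idxOf_cons_ne _ (show x - prev ≠ (pvDs x rest).foldl max maxI by omega)]
        rfl

-- ===== VERDICT (by name: the statement is the Claim_ definition above) =====
theorem middleOfLargestInterval_spec : Claim_equal_middleOfLargestInterval := by
  intro listCalls maxTime _
  unfold Spec_middleOfLargestInterval
  cases listCalls with
  | nil => rfl
  | cons h t =>
    unfold middleOfLargestInterval middleOfLargestInterval_alt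
    dsimp only
    have hfoldB : ((h :: t).zip t).map (fun p => p.2 - p.1) = pvDs h t := rfl
    rw [hfoldB]
    obtain ⟨c1, c2, c3⟩ :=
      pvALoop_char t h h (if h = 0 then (0 : Int) else PySem.Int.floordiv (h - 1) 2)
    rw [c1, c2, c3]
    set lst := PySem.List.pyGetD (h :: t) (-1) 0 with hlst
    set gt := maxTime - 1 - lst with hgt
    set M' := (pvDs h t).foldl max h with hM'
    have hM'ge : h ≤ M' := (PySem.List.le_foldl_max (pvDs h t) h).1
    have hM'mem : M' = h ∨ M' ∈ pvDs h t := PySem.List.foldl_max_mem (pvDs h t) h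
    have hM'top : ∀ y ∈ pvDs h t, y ≤ M' := (PySem.List.le_foldl_max (pvDs h t) h).2
    have hdslen : (pvDs h t).length = t.length := by
      simp [pvDs, List.length_zip]
    have hmax? : PySem.List.max? (h :: pvDs h t ++ [gt]) (fun x => x)
        = some ((pvDs h t ++ [gt]).foldl max h) := PySem.List.max?_id_cons _ _
    have hfold : (pvDs h t ++ [gt]).foldl max h = max M' gt := by
      rw [List.foldl_append]; rfl
    by_cases hcase : M' < gt
    · -- trailing gap strictly biggest: both return the trailing midpoint
      have hbig : max M' gt = gt := by
        rw [max_def, if_pos (le_of_lt hcase)]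
      have hnot : gt ∉ h :: pvDs h t := by
        intro hmem
        rcases List.mem_cons.mp hmem with he | hm
        · omega
        · exact absurd (hM'top _ hm) (by omega)
      have hidx : PySem.List.index? (h :: pvDs h t ++ [gt]) gt
          = some (h :: pvDs h t).length :=
        PySem.List.index?_append_singleton_self (h :: pvDs h t) gt hnot
      rw [if_pos hcase]
      simp only [hmax?, hfold, hbig, hidx]
      rw [if_neg (show ¬ (h :: pvDs h t).length = 0 by simp)]
      rw [if_pos (show (h :: pvDs h t).length = (h :: t).length by
        simp only [List.length_cons, hdslen])]
    · -- max attained inside h :: deltas: A's carried position = B's indexed midpoint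
      have hbig : max M' gt = M' := by
        rw [max_def]
        split_ifs with hle
        · omega
        · rfl
      have hmem : M' ∈ h :: pvDs h t := by
        rcases hM'mem with he | hm
        · rw [he]; exact List.mem_cons_self
        · exact List.mem_cons_of_mem _ hm
      have hidx : PySem.List.index? (h :: pvDs h t ++ [gt]) M'
          = some ((h :: pvDs h t).idxOf M') := by
        rw [show h :: pvDs h t ++ [gt] = (h :: pvDs h t) ++ [gt] from rfl,
          PySem.List.index?_append_of_mem _ hmem, index?_of_mem _ _ hmem]
      rw [if_neg hcase]
      simp only [hmax?, hfold, hbig, hidx]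
      by_cases hh : h = M'
      · rw [show (h :: pvDs h t).idxOf M' = 0 by rw [← hh, List.idxOf_cons_self]]
        rw [if_pos rfl, if_pos hh.symm]
      · have hmm : M' ∈ pvDs h t := by
          rcases hM'mem with he | hm
          · exact absurd he.symm hh
          · exact hm
        have hjlt : (pvDs h t).idxOf M' < t.length :=
          hdslen ▸ List.idxOf_lt_length_of_mem hmm
        rw [List.idxOf_cons_ne _ hh]
        rw [if_neg (fun he => hh he.symm)]
        rw [if_neg (show ¬ ((pvDs h t).idxOf M').succ = 0 by simp)]
        rw [if_neg (show ¬ ((pvDs h t).idxOf M').succ = (h :: t).length by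
          simp only [List.length_cons]; omega)]
        rfl
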